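-- pv_equiv track=rewrite | github.com/Getfliff/periodiq | periodiq.py | group_intervals
-- ===== SOURCE A (Python) =====
-- def group_intervals(values):
--     last = values[0]
--     start = last
--     for v in values[1:]:
--         diff = v - last
--         if diff > 1:
--             yield start, last
--             start = v
--         last = v
--     yield start, last
-- ===== SOURCE B (Python) =====
-- def group_intervals(values):
--     res = []
--     for v in reversed(values):
--         if res and res[-1][0] - v <= 1:
--             res[-1] = (v, res[-1][1])
--         else:
--             res.append((v, v))
--     yield from reversed(res)
-- ===== Notes on version B (the rewrite author's own statement) =====
-- stated objective: alternative
-- what changed: B scans the list right-to-left, merging each element into the leftmost interval built so far (a reverse fold over intervals), instead of A's left-to-right loop carrying start/last state and emitting an interval at each break; Pre_ excludes the empty list, on which A raises IndexError when it indexes the first element while B yields nothing.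
import Mathlib
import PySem

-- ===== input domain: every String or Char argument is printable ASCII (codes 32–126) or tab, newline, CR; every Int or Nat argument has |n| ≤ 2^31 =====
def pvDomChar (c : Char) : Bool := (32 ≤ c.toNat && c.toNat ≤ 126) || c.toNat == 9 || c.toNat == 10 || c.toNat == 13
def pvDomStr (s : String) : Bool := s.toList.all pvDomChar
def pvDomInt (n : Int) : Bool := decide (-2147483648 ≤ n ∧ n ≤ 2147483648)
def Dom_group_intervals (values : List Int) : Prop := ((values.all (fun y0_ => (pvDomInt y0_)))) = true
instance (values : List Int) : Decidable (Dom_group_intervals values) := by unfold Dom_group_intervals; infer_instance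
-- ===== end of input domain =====

-- B builds the intervals by a reverse fold that merges each element into the leftmost
-- interval built so far, instead of A's forward loop with start/last state; both are
-- generators in Python — the equivalence is about the full list of yielded pairs.

-- ===== PORT A =====
-- A: last = first element; start = last; loop over values[1:] with (start, last, yielded) state;
-- loop over the tail with (start, last, yielded) state; final yield of (start, last).
def group_intervals (values : List Int) : List (Int × Int) :=
  match values with
  | [] => []  -- indexing the first element raises IndexError; excluded by Pre_group_intervals
  | v0 :: rest =>   -- the slice from index one of a nonempty list is its tail
    let st := rest.foldl (fun (p : Int × Int × List (Int × Int)) v =>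
      if v - p.2.1 > 1 then (v, v, p.2.2 ++ [(p.1, p.2.1)])
      else (p.1, v, p.2.2)) (v0, v0, ([] : List (Int × Int)))
    st.2.2 ++ [(st.1, st.2.1)]

-- ===== PORT B =====
-- B: loop over reversed(values), res holds intervals most-recently-appended first
-- (so the Lean list head is Python's res[-1], and Python's final reversed(res) is this
-- list as it stands); merge v into the head interval when head.start - v <= 1.
def group_intervals_alt (values : List Int) : List (Int × Int) :=
  values.reverse.foldl (fun res v =>
    match res with
    | [] => [(v, v)]
    | (s, e) :: rs => if s - v ≤ 1 then (v, e) :: rs else (v, v) :: (s, e) :: rs) []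

-- ===== PRECONDITION & SPEC =====
-- A indexes the first element up front: it raises IndexError on the empty list (and only there).
def Pre_group_intervals (values : List Int) : Prop := values ≠ []
instance (values : List Int) : Decidable (Pre_group_intervals values) := by unfold Pre_group_intervals; infer_instance
def pvWitness_group_intervals : List Int := ([1, 2, 5])

def Spec_group_intervals (values : List Int) (out : List (Int × Int)) : Prop := out = group_intervals_alt values
instance (values : List Int) (out : List (Int × Int)) : Decidable (Spec_group_intervals values out) := by unfold Spec_group_intervals; infer_instance

-- ===== CLAIM (what is proved, stated in full; the proofs are below) =====
def Claim_equal_group_intervals : Prop := ∀ (values : List Int), Dom_group_intervals values → Pre_group_intervals values → Spec_group_intervals values (group_intervals values)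

-- ===== LEMMAS AND PROOFS =====

-- B's loop step, and B expressed as a foldr
def gStep (res : List (Int × Int)) (v : Int) : List (Int × Int) :=
  match res with
  | [] => [(v, v)]
  | (s, e) :: rs => if s - v ≤ 1 then (v, e) :: rs else (v, v) :: (s, e) :: rs

def gRun (l : List Int) : List (Int × Int) := l.foldr (fun v r => gStep r v) []

-- replace the start of the first interval
def setFirst (s : Int) : List (Int × Int) → List (Int × Int)
  | [] => []
  | (_, e) :: rs => (s, e) :: rs

lemma gRun_head (v : Int) (rest : List Int) : ∃ e rs, gRun (v :: rest) = (v, e) :: rs := by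
  induction rest generalizing v with
  | nil => exact ⟨v, [], rfl⟩
  | cons w ws ih =>
    obtain ⟨e, rs, h⟩ := ih w
    simp only [gRun, List.foldr] at h ⊢
    rw [h]
    simp only [gStep]
    split_ifs <;> exact ⟨_, _, rfl⟩

lemma runA_eq (rest : List Int) : ∀ (start last : Int) (acc : List (Int × Int)),
    (let st := rest.foldl (fun (p : Int × Int × List (Int × Int)) v =>
      if v - p.2.1 > 1 then (v, v, p.2.2 ++ [(p.1, p.2.1)])
      else (p.1, v, p.2.2)) (start, last, acc)
    st.2.2 ++ [(st.1, st.2.1)]) = acc ++ setFirst start (gRun (last :: rest)) := by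
  induction rest with
  | nil => intro start last acc; simp [gRun, gStep, setFirst]
  | cons v ws ih =>
    intro start last acc
    obtain ⟨e, rs, hh⟩ := gRun_head v ws
    have hB : gRun (last :: v :: ws) = gStep (gRun (v :: ws)) last := rfl
    simp only [List.foldl]
    by_cases h : v - last > 1
    · simp only [h, if_pos]
      rw [ih v v (acc ++ [(start, last)])]
      rw [hB, hh]
      simp only [gStep]
      rw [if_neg (by omega)]
      simp [setFirst]
    · simp only [h, if_neg, not_false_iff]
      rw [ih start v acc]
      rw [hB, hh]
      simp only [gStep]
      rw [if_pos (by omega)]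
      simp [setFirst]

lemma alt_eq_gRun (values : List Int) :
    group_intervals_alt values = gRun values := by
  simp only [group_intervals_alt, gRun, List.foldl_reverse]
  rfl

-- ===== VERDICT (by name: the statement is the Claim_ definition above) =====
theorem group_intervals_spec : Claim_equal_group_intervals := by
  intro values _ hpre
  unfold Spec_group_intervals
  match values with
  | [] => exact absurd rfl hpre
  | v0 :: rest =>
    obtain ⟨e, rs, hh⟩ := gRun_head v0 rest
    rw [alt_eq_gRun]
    show (let st := rest.foldl _ (v0, v0, ([] : List (Int × Int))); st.2.2 ++ [(st.1, st.2.1)]) = _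
    rw [runA_eq rest v0 v0 [], hh]
    simp [setFirst]
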